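-- pv_equiv track=rewrite | github.com/gaus07/Real-World-Application | Nodepad/notepad.py | find_and_replace_logic
-- ===== SOURCE A (Python) =====
-- def find_and_replace_logic(text, target, replacement):
--     res = []
--     i = 0
--
--     while i < len(text):
--         if text[i:i+len(target)] == target:
--             res.append(replacement)
--             i += len(target)
--         else:
--             res.append(text[i])
--             i += 1
--     return ''.join(res)
-- ===== SOURCE B (Python) =====
-- def find_and_replace_logic(text, target, replacement):
--     chunks = []
--     i = 0
--     while True:
--         j = text.find(target, i)
--         if j == -1:
--             chunks.append(text[i:])
--             break
--         chunks.append(text[i:j])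
--         chunks.append(replacement)
--         i = j + len(target)
--     return ''.join(chunks)
-- ===== Notes on version B (the rewrite author's own statement) =====
-- stated objective: faster
-- what changed: B jumps from occurrence to occurrence with str.find instead of testing a slice at every character index.
-- outside the precondition, e.g. on find_and_replace_logic('', '', 'x'): A returns '', B does not finish within the time limit
import Mathlib
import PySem

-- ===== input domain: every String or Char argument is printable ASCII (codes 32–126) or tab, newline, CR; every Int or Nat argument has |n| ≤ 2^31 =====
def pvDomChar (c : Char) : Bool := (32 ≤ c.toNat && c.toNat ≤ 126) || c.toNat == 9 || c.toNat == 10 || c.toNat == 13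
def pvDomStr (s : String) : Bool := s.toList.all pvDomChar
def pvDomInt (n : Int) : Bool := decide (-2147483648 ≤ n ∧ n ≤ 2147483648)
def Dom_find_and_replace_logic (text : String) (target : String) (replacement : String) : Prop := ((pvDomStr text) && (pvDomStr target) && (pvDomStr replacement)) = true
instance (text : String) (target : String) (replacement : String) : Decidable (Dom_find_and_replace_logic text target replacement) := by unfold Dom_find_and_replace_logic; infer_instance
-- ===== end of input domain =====

-- B replaces A's per-character slice test by jumping from occurrence to occurrence with str.find (faster by a constant factor); return-value equivalence, no mutation involved.

-- ===== PORT A =====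
-- A's while loop as fuel recursion; fuel text.length+1 is never exhausted when target ≠ ""
-- (each iteration advances i by ≥ 1), matching the Python exactly on Pre_.
def pvLoopA (L T R : List Char) : Nat → Nat → List Char → List Char
  | 0, _, acc => acc
  | fuel+1, i, acc =>
    if i < L.length then
      if PySem.List.slice L (some (i : Int)) (some ((i : Int) + (T.length : Int))) = T then
        pvLoopA L T R fuel (i + T.length) (acc ++ R)
      else
        -- text[i] with 0 ≤ i < len(text): pyGet? is always `some` here
        match PySem.List.pyGet? L (i : Int) with
        | some c => pvLoopA L T R fuel (i + 1) (acc ++ [c])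
        | none => acc
    else acc

def find_and_replace_logic (text : String) (target : String) (replacement : String) : String :=
  String.mk (pvLoopA text.toList target.toList replacement.toList (text.toList.length + 1) 0 [])

-- ===== PORT B =====
-- B's while True loop over match positions; same fuel guard, never exhausted when target ≠ ""
-- (each iteration advances i by ≥ len(target) ≥ 1).  ''.join(chunks) = flatten at char level.
def pvLoopB (L T R : List Char) : Nat → Nat → List (List Char) → List (List Char)
  | 0, _, chunks => chunks
  | fuel+1, i, chunks =>
    let j := PySem.Chars.findFrom L T (i : Int)
    if j = -1 then
      chunks ++ [PySem.List.slice L (some (i : Int)) none]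
    else
      pvLoopB L T R fuel (j.toNat + T.length)
        (chunks ++ [PySem.List.slice L (some (i : Int)) (some j), R])

def find_and_replace_logic_alt (text : String) (target : String) (replacement : String) : String :=
  String.mk ((pvLoopB text.toList target.toList replacement.toList (text.toList.length + 1) 0 []).flatten)

-- ===== PRECONDITION & SPEC =====
-- Pre_ excludes an empty target, on which both loops run forever (A returns only on empty text
-- there, where B still loops forever).
def Pre_find_and_replace_logic (text : String) (target : String) (replacement : String) : Prop :=
  target ≠ ""
instance (text : String) (target : String) (replacement : String) : Decidable (Pre_find_and_replace_logic text target replacement) := by unfold Pre_find_and_replace_logic; infer_instance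

def pvWitness_find_and_replace_logic : String × String × String := ("abcabca", "bc", "X")

def Spec_find_and_replace_logic (text : String) (target : String) (replacement : String) (out : String) : Prop := out = find_and_replace_logic_alt text target replacement
instance (text : String) (target : String) (replacement : String) (out : String) : Decidable (Spec_find_and_replace_logic text target replacement out) := by unfold Spec_find_and_replace_logic; infer_instance

-- ===== CLAIM (what is proved, stated in full; the proofs are below) =====
def Claim_equal_find_and_replace_logic : Prop := ∀ (text : String) (target : String) (replacement : String), Dom_find_and_replace_logic text target replacement → Pre_find_and_replace_logic text target replacement → Spec_find_and_replace_logic text target replacement (find_and_replace_logic text target replacement)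

-- ===== LEMMAS AND PROOFS =====

-- A's slice test at index i is exactly "T is a prefix of L.drop i".
theorem pvSliceTest (L T : List Char) (i : Nat) :
    (PySem.List.slice L (some (i : Int)) (some ((i : Int) + (T.length : Int))) = T) ↔ T <+: L.drop i := by
  rw [PySem.List.slice_natCast_add, List.prefix_iff_eq_take, eq_comm]

-- If no occurrence starts at or after i, A copies the tail character by character.
theorem pvScanNo (L T R : List Char) :
    ∀ fuel i acc, L.length ≤ fuel + i → (∀ k, i ≤ k → ¬ T <+: L.drop k) →
      pvLoopA L T R fuel i acc = acc ++ L.drop i := by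
  intro fuel
  induction fuel with
  | zero =>
    intro i acc hf _
    have hd : List.drop i L = [] := List.drop_eq_nil_of_le (by omega)
    simp [pvLoopA, hd]
  | succ f ih =>
    intro i acc hf h
    by_cases hi : i < L.length
    · have hm : ¬ (PySem.List.slice L (some (i : Int)) (some ((i : Int) + (T.length : Int))) = T) := by
        rw [pvSliceTest]; exact h i le_rfl
      have hget : PySem.List.pyGet? L (i : Int) = some (L[i]'hi) := by
        simp [PySem.List.pyGet?_natCast, List.getElem?_eq_getElem hi]
      rw [pvLoopA, if_pos hi, if_neg hm, hget]
      show pvLoopA L T R f (i + 1) (acc ++ [L[i]'hi]) = _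
      rw [ih (i + 1) (acc ++ [L[i]'hi]) (by omega) (fun k hk => h k (by omega))]
      rw [List.drop_eq_getElem_cons hi]
      simp
    · rw [pvLoopA, if_neg hi]
      have hd : List.drop i L = [] := List.drop_eq_nil_of_le (by omega)
      simp [hd]

-- If no occurrence starts in [i, i+d), A copies those d characters one by one.
theorem pvScanTo (L T R : List Char) :
    ∀ d fuel i acc, i + d ≤ L.length → d ≤ fuel →
      (∀ k, i ≤ k → k < i + d → ¬ T <+: L.drop k) →
      pvLoopA L T R fuel i acc = pvLoopA L T R (fuel - d) (i + d) (acc ++ (L.drop i).take d) := by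
  intro d
  induction d with
  | zero => intro fuel i acc _ _ _; simp
  | succ d ih =>
    intro fuel i acc hlen hfuel h
    obtain ⟨f, rfl⟩ : ∃ f, fuel = f + 1 := ⟨fuel - 1, by omega⟩
    have hi : i < L.length := by omega
    have hm : ¬ (PySem.List.slice L (some (i : Int)) (some ((i : Int) + (T.length : Int))) = T) := by
      rw [pvSliceTest]; exact h i le_rfl (by omega)
    have hget : PySem.List.pyGet? L (i : Int) = some (L[i]'hi) := by
      simp [PySem.List.pyGet?_natCast, List.getElem?_eq_getElem hi]
    rw [pvLoopA, if_pos hi, if_neg hm, hget]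
    show pvLoopA L T R f (i + 1) (acc ++ [L[i]'hi]) = _
    rw [ih f (i + 1) (acc ++ [L[i]'hi]) (by omega) (by omega)
        (fun k hk1 hk2 => h k (by omega) (by omega))]
    have : (L.drop i).take (d + 1) = (L[i]'hi) :: (L.drop (i + 1)).take d := by
      rw [List.drop_eq_getElem_cons hi, List.take_succ_cons]
    rw [this,
      show f + 1 - (d + 1) = f - d from by omega,
      show i + (d + 1) = i + 1 + d from by omega]
    congr 1
    simp

-- One A-step across a match at i.
theorem pvStepMatch (L T R : List Char) (f i : Nat) (acc : List Char)
    (hi : i < L.length) (hm : T <+: L.drop i) :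
    pvLoopA L T R (f + 1) i acc = pvLoopA L T R f (i + T.length) (acc ++ R) := by
  rw [pvLoopA, if_pos hi, if_pos ((pvSliceTest L T i).mpr hm)]

-- prefix of some drop at position ≥ i  ⇒  infix of L.drop i
theorem pvPrefixDropInfix (L T : List Char) (i k : Nat) (hik : i ≤ k)
    (h : T <+: L.drop k) : T <:+: L.drop i := by
  have : L.drop k = (L.drop i).drop (k - i) := by
    rw [List.drop_drop]; congr 1; omega
  rw [this] at h
  exact h.isInfix.trans (List.drop_suffix _ _).isInfix

-- Main equivalence of the two loops, by induction on the remaining length.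
theorem pvMain (L T R : List Char) (hT : T ≠ []) :
    ∀ n i chunks fuelA fuelB, i ≤ L.length → L.length - i < n →
      L.length ≤ fuelA + i → L.length - i < fuelB →
      pvLoopA L T R fuelA i chunks.flatten = (pvLoopB L T R fuelB i chunks).flatten := by
  intro n
  induction n with
  | zero => intro i _ _ _ _ h; omega
  | succ n ih =>
    intro i chunks fuelA fuelB hi hn hfa hfb
    obtain ⟨fB, rfl⟩ : ∃ f, fuelB = f + 1 := ⟨fuelB - 1, by omega⟩
    by_cases hj : PySem.Chars.findFrom L T (i : Int) = -1
    · -- no further occurrence: B emits the tail, A copies it char by char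
      have hno : ∀ k, i ≤ k → ¬ T <+: L.drop k := by
        intro k hk hpre
        exact ((PySem.Chars.findFrom_natCast_eq_neg_one_iff L T i hi).mp hj)
          (pvPrefixDropInfix L T i k hk hpre)
      rw [pvScanNo L T R fuelA i chunks.flatten (by omega) hno]
      rw [pvLoopB, if_pos hj]
      simp [PySem.List.slice_from_natCast]
    · -- first occurrence at p := j.toNat
      obtain ⟨hle, hpre, hmin⟩ := PySem.Chars.findFrom_natCast_spec L T i hi hj
      set j := PySem.Chars.findFrom L T (i : Int) with hjdef
      have hj0 : 0 ≤ j := le_trans (by exact_mod_cast Nat.zero_le i) hle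
      set p := j.toNat with hp
      have hip : i ≤ p := by omega
      have hTlen : 1 ≤ T.length := by
        cases T with | nil => exact absurd rfl hT | cons a t => simp
      have hplen : p + T.length ≤ L.length := by
        have := hpre.length_le
        simp [List.length_drop] at this
        omega
      have hAd : pvLoopA L T R fuelA i chunks.flatten
          = pvLoopA L T R (fuelA - (p - i)) p (chunks.flatten ++ (L.drop i).take (p - i)) := by
        have := pvScanTo L T R (p - i) fuelA i chunks.flatten (by omega) (by omega)
          (fun k hk1 hk2 => hmin k (by exact_mod_cast hk1) (by omega))
        rwa [show i + (p - i) = p from by omega] at this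
      obtain ⟨fA, hfA⟩ : ∃ f, fuelA - (p - i) = f + 1 := ⟨fuelA - (p - i) - 1, by omega⟩
      rw [hAd, hfA, pvStepMatch L T R fA p _ (by omega) hpre]
      have hBstep : pvLoopB L T R (fB + 1) i chunks
          = pvLoopB L T R fB (p + T.length)
              (chunks ++ [PySem.List.slice L (some (i : Int)) (some j), R]) := by
        rw [pvLoopB, if_neg hj]
      rw [hBstep]
      have hslice : PySem.List.slice L (some (i : Int)) (some j) = (L.drop i).take (p - i) := by
        have : j = ((p : Nat) : Int) := by omega
        rw [this, PySem.List.slice_natCast]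
      have hflat : (chunks ++ [PySem.List.slice L (some (i : Int)) (some j), R]).flatten
          = chunks.flatten ++ (L.drop i).take (p - i) ++ R := by
        simp [hslice]
      rw [← hflat] at *
      exact ih (p + T.length) (chunks ++ [PySem.List.slice L (some (i : Int)) (some j), R])
        fA fB (by omega) (by omega) (by omega) (by omega)

-- ===== VERDICT (by name: the statement is the Claim_ definition above) =====
theorem find_and_replace_logic_spec : Claim_equal_find_and_replace_logic := by
  intro text target replacement _ hpre
  unfold Spec_find_and_replace_logic find_and_replace_logic find_and_replace_logic_alt
  have hT : target.toList ≠ [] := by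
    intro h
    exact hpre (by simpa using congrArg String.ofList h)
  have := pvMain text.toList target.toList replacement.toList hT
    (text.toList.length + 1) 0 [] (text.toList.length + 1) (text.toList.length + 1)
    (Nat.zero_le _) (by omega) (by omega) (by omega)
  simpa using congrArg String.mk this
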